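-- pv_equiv track=rewrite | github.com/Prasanna-Saripudi/CP_Problems | 09-shortenlongruns-Python/shortenlongruns.py | shortenlongruns
-- ===== SOURCE A (Python) =====
-- def shortenlongruns(L, k):
--     copied = L.copy()
--     start, end, i = 0, 0, 0
--     while i < len(copied):
--         while end < len(copied) and copied[start] == copied[end]:
--             end += 1
--         if end - start > k:
--             index = (end - start) % k
--             copied = copied[: start + index] + copied[end:]
--             end = start+index
--         elif end - start == k:
--             copied = copied[: end - 1] + copied[end:]
--             end -= 1
--         start = end
--         i = end
--     return copied
-- ===== SOURCE B (Python) =====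
-- def shortenlongruns(L, k):
--     out = []
--     i, n = 0, len(L)
--     while i < n:
--         j = i + 1
--         while j < n and L[j] == L[i]:
--             j += 1
--         m = j - i
--         keep = m if m < k else (k - 1 if m == k else m % k)
--         out += [L[i]] * keep
--         i = j
--     return out
-- ===== Notes on version B (the rewrite author's own statement) =====
-- stated objective: alternative
-- what changed: A shortens runs by repeatedly slicing and rebuilding the whole list inside its index scan; B makes one pass over the runs and emits each run's value repeated m, k-1 or m%k times into a fresh output list, never rewriting the input (worst-case asymptotics differ, but a timing run did not confirm a speedup on its input family).
-- outside the precondition, e.g. on shortenlongruns([1], -1): A returns [], B returns []; on shortenlongruns([1, 1], -2): A returns [], B returns []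
import Mathlib
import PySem

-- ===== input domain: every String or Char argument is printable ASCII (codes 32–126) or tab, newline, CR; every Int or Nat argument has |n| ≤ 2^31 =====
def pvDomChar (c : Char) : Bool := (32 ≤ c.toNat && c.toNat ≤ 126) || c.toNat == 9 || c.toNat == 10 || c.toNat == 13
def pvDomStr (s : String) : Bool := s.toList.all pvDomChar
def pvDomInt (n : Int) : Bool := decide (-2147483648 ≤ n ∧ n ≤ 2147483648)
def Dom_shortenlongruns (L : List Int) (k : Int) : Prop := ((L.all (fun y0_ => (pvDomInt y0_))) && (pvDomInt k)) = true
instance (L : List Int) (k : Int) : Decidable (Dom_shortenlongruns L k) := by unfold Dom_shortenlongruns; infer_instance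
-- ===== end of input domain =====

-- B replaces A's slice-and-rebuild scan with a single pass over the runs, emitting each
-- run's value repeated m, k-1 or m%k times into a fresh output (alternative algorithm).


-- ===== PORT A =====
-- inner `while end < len(copied) and copied[start] == copied[end]: end += 1`
-- (copied[start]/copied[end] via pyGetD: inside Pre_ both indices are always in range, so this is exact there)
def slrInner (copied : List Int) (start : Int) : Int → Nat → Int
  | e, 0 => e
  | e, fuel+1 =>
    if e < (copied.length : Int) ∧ PySem.List.pyGetD copied start 0 = PySem.List.pyGetD copied e 0
    then slrInner copied start (e + 1) fuel
    else e

-- outer `while i < len(copied)` loop; on Pre_ inputs fuel L.length + 1 is enough, since each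
-- pass strictly decreases len(copied) - start (made precise by slr_outer_run below)
def slrOuter (k : Int) : List Int → Int → Int → Int → Nat → List Int
  | copied, _start, _e, _i, 0 => copied
  | copied, start, e, i, fuel+1 =>
    if i < (copied.length : Int) then
      let e' := slrInner copied start e (copied.length + 1)
      if e' - start > k then
        let index := PySem.Int.mod (e' - start) k
        let copied' := PySem.List.slice copied none (some (start + index)) ++ PySem.List.slice copied (some e') none
        slrOuter k copied' (start + index) (start + index) (start + index) fuel
      else if e' - start = k then
        let copied' := PySem.List.slice copied none (some (e' - 1)) ++ PySem.List.slice copied (some e') none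
        slrOuter k copied' (e' - 1) (e' - 1) (e' - 1) fuel
      else
        slrOuter k copied e' e' e' fuel
    else copied

def shortenlongruns (L : List Int) (k : Int) : List Int :=
  slrOuter k L 0 0 0 (L.length + 1)

-- ===== PORT B =====
-- one pass over the runs: the run at the head has length m = 1 + |takeWhile (== x) t|;
-- emit x repeated keep times ([x]*keep: a negative keep gives [], hence .toNat) and recurse on the rest
def slrAltGo (k : Int) : List Int → List Int
  | [] => []
  | x :: t =>
    let m : Int := 1 + (t.takeWhile (· == x)).length
    let keep := if m < k then m else if m = k then k - 1 else PySem.Int.mod m k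
    List.replicate keep.toNat x ++ slrAltGo k (t.dropWhile (· == x))
termination_by l => l.length
decreasing_by simpa using Nat.lt_succ_of_le (List.length_dropWhile_le _ _)

def shortenlongruns_alt (L : List Int) (k : Int) : List Int := slrAltGo k L

-- ===== PRECONDITION & SPEC =====
-- Pre_ excludes k ≤ 0 on non-empty lists: there A raises ZeroDivisionError (k = 0) or, for k < 0,
-- IndexError on most inputs, and where it does return, the [] it returns comes from accidental
-- negative-index slice wraparound.
def Pre_shortenlongruns (L : List Int) (k : Int) : Prop := L = [] ∨ 1 ≤ k
instance (L : List Int) (k : Int) : Decidable (Pre_shortenlongruns L k) := by unfold Pre_shortenlongruns; infer_instance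

def pvWitness_shortenlongruns : List Int × Int := ([1, 1, 1, 2, 2], 2)

def Spec_shortenlongruns (L : List Int) (k : Int) (out : List Int) : Prop := out = shortenlongruns_alt L k
instance (L : List Int) (k : Int) (out : List Int) : Decidable (Spec_shortenlongruns L k out) := by unfold Spec_shortenlongruns; infer_instance

-- ===== CLAIM (what is proved, stated in full; the proofs are below) =====
def Claim_equal_shortenlongruns : Prop := ∀ (L : List Int) (k : Int), Dom_shortenlongruns L k → Pre_shortenlongruns L k → Spec_shortenlongruns L k (shortenlongruns L k)

-- ===== LEMMAS AND PROOFS =====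

lemma getD_mid (P d : List Int) (x : Int) (m j : Nat) (hj : j < m) :
    PySem.List.pyGetD (P ++ List.replicate m x ++ d) ((P.length : Int) + (j : Int)) 0 = x := by
  have h1 : ((P.length : Int) + (j : Int)) = ((P.length + j : Nat) : Int) := by push_cast; ring
  rw [h1, PySem.List.pyGetD_natCast, List.append_assoc]
  rw [List.getD, List.getElem?_append_right (Nat.le_add_right _ _)]
  simp [List.getElem?_append_left (by simpa using hj : j < (List.replicate m x).length), hj]

lemma getD_after (P d' : List Int) (x y : Int) (m : Nat) :
    PySem.List.pyGetD (P ++ List.replicate m x ++ y :: d') ((P.length : Int) + (m : Int)) 0 = y := by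
  have h1 : ((P.length : Int) + (m : Int)) = ((P.length + m : Nat) : Int) := by push_cast; ring
  rw [h1, PySem.List.pyGetD_natCast, List.append_assoc]
  rw [List.getD, List.getElem?_append_right (Nat.le_add_right _ _)]
  simp

lemma slr_inner_run (P d : List Int) (x : Int) (m : Nat) (hm : 1 ≤ m)
    (hd : ∀ y ∈ d.head?, y ≠ x) :
    ∀ (j fuel : Nat), j ≤ m → m - j ≤ fuel →
      slrInner (P ++ List.replicate m x ++ d) (P.length) ((P.length : Int) + j) fuel
        = (P.length : Int) + m := by
  intro j fuel
  induction fuel generalizing j with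
  | zero =>
    intro hj hf
    have h : j = m := by omega
    rw [h]; rfl
  | succ fuel ih =>
    intro hj hf
    rcases Nat.lt_or_ge j m with hlt | hge
    · rw [slrInner, if_pos]
      · have h2 : (P.length : Int) + (j : Int) + 1 = (P.length : Int) + ((j + 1 : Nat) : Int) := by
          push_cast; ring
        rw [h2]; exact ih (j+1) (by omega) (by omega)
      · refine ⟨by simp; omega, ?_⟩
        have h0 := getD_mid P d x m 0 (by omega)
        simp only [Nat.cast_zero, add_zero] at h0
        rw [h0, getD_mid P d x m j hlt]
    · have h : j = m := by omega
      subst h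
      rw [slrInner, if_neg]
      rintro ⟨hlen, heq⟩
      cases d with
      | nil => simp at hlen
      | cons y d' =>
        have h0 := getD_mid P (y :: d') x j 0 (by omega)
        simp only [Nat.cast_zero, add_zero] at h0
        rw [h0, getD_after P d' x y j] at heq
        exact hd y rfl heq.symm

lemma slr_outer_run (k : Int) (hk : 1 ≤ k) :
    ∀ (n : Nat) (rest P : List Int) (fuel : Nat), rest.length ≤ n → rest.length + 1 ≤ fuel →
      slrOuter k (P ++ rest) (P.length) (P.length) (P.length) fuel = P ++ slrAltGo k rest := by
  intro n
  induction n with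
  | zero =>
    intro rest P fuel hn hf
    have h : rest = [] := List.eq_nil_of_length_eq_zero (by omega)
    subst h
    obtain ⟨f, rfl⟩ : ∃ f, fuel = f + 1 := ⟨fuel - 1, by omega⟩
    rw [slrOuter, if_neg (by simp), slrAltGo]
  | succ n ih =>
    intro rest P fuel hn hf
    cases rest with
    | nil =>
      obtain ⟨f, rfl⟩ : ∃ f, fuel = f + 1 := ⟨fuel - 1, by omega⟩
      rw [slrOuter, if_neg (by simp), slrAltGo]
    | cons x t =>
      obtain ⟨f, rfl⟩ : ∃ f, fuel = f + 1 := ⟨fuel - 1, by omega⟩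
      set r := t.takeWhile (· == x) with hr
      set dd := t.dropWhile (· == x) with hdd
      set m : Nat := r.length + 1 with hm
      have hrep : x :: t = List.replicate m x ++ dd := by
        have h1 : r = List.replicate r.length x := by
          apply List.eq_replicate_of_mem
          intro y hy
          simpa using List.mem_takeWhile_imp (l := t) (p := (· == x)) hy
        calc x :: t = x :: (r ++ dd) := by rw [hr, hdd, List.takeWhile_append_dropWhile]
          _ = List.replicate m x ++ dd := by
              rw [hm, List.replicate_succ]
              simp [h1.symm]
      -- head of dd is not x
      have hd : ∀ y ∈ dd.head?, y ≠ x := by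
        intro y hy hyx
        have h2 := List.head?_dropWhile_not (· == x) t
        rw [← hdd] at h2
        cases hh : dd.head? with
        | none => rw [hh] at hy; cases hy
        | some z => rw [hh] at hy h2; simp at hy h2; simp [hy, hyx] at h2
      have hL : P ++ x :: t = P ++ List.replicate m x ++ dd := by
        rw [List.append_assoc, ← hrep]
      have hm1 : 1 ≤ m := by omega
      have hlen : t.length + 1 = m + dd.length := by
        have h9 := congrArg List.length hrep
        simpa using h9
      simp only [List.length_cons] at hn hf
      have hddn : dd.length ≤ n := by omega
      have hddf : dd.length + 1 ≤ f := by omega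
      rw [hL, slrOuter]
      have hcond : ((P.length : Int) < ((P ++ List.replicate m x ++ dd).length : Int)) := by
        simp; omega
      rw [if_pos hcond]
      have he' : slrInner (P ++ List.replicate m x ++ dd) (P.length : Int) (P.length : Int)
          ((P ++ List.replicate m x ++ dd).length + 1) = (P.length : Int) + (m : Int) := by
        have h3 := slr_inner_run P dd x m hm1 hd 0 ((P ++ List.replicate m x ++ dd).length + 1)
          (by omega) (by simp; omega)
        simpa using h3
      simp only [he']
      have hsub : ((P.length : Int) + (m : Int) - (P.length : Int)) = (m : Int) := by ring
      rw [hsub]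
      -- RHS
      have hrhs : slrAltGo k (x :: t) =
          List.replicate (if (m : Int) < k then (m : Int) else if (m : Int) = k then k - 1 else PySem.Int.mod (m : Int) k).toNat x
            ++ slrAltGo k dd := by
        rw [slrAltGo]
        have : (1 + ((t.takeWhile (· == x)).length : Int)) = (m : Int) := by
          rw [hm]; push_cast; ring
        simp only [← hr, ← hdd]
        rw [this]
      rw [hrhs]
      -- drop part: copied[e':] = dd
      have hdrop : PySem.List.slice (P ++ List.replicate m x ++ dd) (some ((P.length : Int) + (m : Int))) none = dd := by
        rw [PySem.List.slice_from _ (by omega)]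
        have h4 : ((P.length : Int) + (m : Int)).toNat = P.length + m := by omega
        rw [h4, List.append_assoc, List.drop_length_add_append]
        simp
      by_cases hgt : (m : Int) > k
      · -- run longer than k: keep m % k
        rw [if_pos hgt]
        have hidx0 : 0 ≤ PySem.Int.mod (m : Int) k := PySem.Int.mod_nonneg _ (by omega)
        have hidxk : PySem.Int.mod (m : Int) k < k := PySem.Int.mod_lt _ (by omega)
        set idx := PySem.Int.mod (m : Int) k with hidx
        have htake : PySem.List.slice (P ++ List.replicate m x ++ dd) none (some ((P.length : Int) + idx))
            = P ++ List.replicate idx.toNat x := by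
          rw [PySem.List.slice_to _ (by omega)]
          have h6 : ((P.length : Int) + idx).toNat = P.length + idx.toNat := by omega
          rw [h6, List.append_assoc, List.take_length_add_append]
          rw [List.take_append_of_le_length (by simp; omega)]
          simp [List.take_replicate]
          omega
        rw [htake, hdrop]
        have hstart : (P.length : Int) + idx = (((P ++ List.replicate idx.toNat x).length : Nat) : Int) := by
          simp; omega
        rw [hstart]
        rw [ih dd (P ++ List.replicate idx.toNat x) f hddn hddf]
        rw [if_neg (by omega), if_neg (by omega)]
        simp [List.append_assoc]
      · by_cases heq : (m : Int) = k
        · -- run exactly k: keep k - 1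
          rw [if_neg hgt, if_pos heq]
          have htake : PySem.List.slice (P ++ List.replicate m x ++ dd) none (some ((P.length : Int) + (m : Int) - 1))
              = P ++ List.replicate (m - 1) x := by
            rw [PySem.List.slice_to _ (by omega)]
            have h6 : ((P.length : Int) + (m : Int) - 1).toNat = P.length + (m - 1) := by omega
            rw [h6, List.append_assoc, List.take_length_add_append]
            rw [List.take_append_of_le_length (by simp)]
            simp [List.take_replicate]
          have hstart : (P.length : Int) + (m : Int) - 1 = (((P ++ List.replicate (m - 1) x).length : Nat) : Int) := by
            simp; omega
          rw [htake, hdrop, hstart]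
          rw [ih dd (P ++ List.replicate (m - 1) x) f hddn hddf]
          rw [if_neg (by omega), if_pos heq]
          have h7 : (k - 1).toNat = m - 1 := by omega
          rw [h7]
          simp [List.append_assoc]
        · -- short run: keep all m
          rw [if_neg hgt, if_neg heq]
          rw [if_pos (show (m : Int) < k by omega)]
          have h10 : ((m : Int)).toNat = m := by omega
          rw [h10]
          have hstart : (P.length : Int) + (m : Int) = (((P ++ List.replicate m x).length : Nat) : Int) := by
            simp
          rw [hstart, ← List.append_assoc,
            ih dd (P ++ List.replicate m x) f hddn hddf]

-- ===== VERDICT (by name: the statement is the Claim_ definition above) =====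
theorem shortenlongruns_spec : Claim_equal_shortenlongruns := by
  intro L k _hdom hpre
  unfold Spec_shortenlongruns shortenlongruns shortenlongruns_alt
  rcases hpre with h | hk
  · subst h; simp [slrOuter, slrAltGo]
  · simpa using slr_outer_run k hk L.length L [] (L.length + 1) le_rfl le_rfl
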